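-- pv_equiv track=rewrite | github.com/kryptex08/AI-ML | CSE-A AI 13/9.py | dfs_tsp
-- ===== SOURCE A (Python) =====
-- def dfs_tsp(graph, start_node):
--     num_nodes = len(graph)
--
--     def dfs(current_node, path):
--         if len(path) == num_nodes:
--             return path + [start_node]  # Complete the tour
--
--         for neighbour in graph[current_node]:
--             if neighbour not in path:  # Ensure the node is not revisited in the current path
--                 tour = dfs(neighbour, path + [neighbour])
--                 if tour:
--                     return tour
--
--         return None
--
--     return dfs(start_node, [start_node])
-- ===== SOURCE B (Python) =====
-- def dfs_tsp(graph, start_node):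
--     # Iterative DFS over an explicit stack of partial paths (same first-tour order as the recursion).
--     num_nodes = len(graph)
--     stack = [[start_node]]
--     while stack:
--         path = stack.pop()
--         if len(path) == num_nodes:
--             return path + [start_node]
--         for neighbour in reversed(graph[path[-1]]):
--             if neighbour not in path:
--                 stack.append(path + [neighbour])
--     return None
-- ===== Notes on version B (the rewrite author's own statement) =====
-- stated objective: alternative
-- what changed: Replaces the recursive backtracking closure with an iterative DFS over an explicit stack of partial paths, pushing neighbours in reversed order so the first Hamiltonian tour found is identical.
-- outside the precondition, e.g. on dfs_tsp({0: [1, 5], 1: [2], 2: [0]}, 0): A returns [0, 1, 2, 0], B returns [0, 1, 2, 0]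
import Mathlib
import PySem

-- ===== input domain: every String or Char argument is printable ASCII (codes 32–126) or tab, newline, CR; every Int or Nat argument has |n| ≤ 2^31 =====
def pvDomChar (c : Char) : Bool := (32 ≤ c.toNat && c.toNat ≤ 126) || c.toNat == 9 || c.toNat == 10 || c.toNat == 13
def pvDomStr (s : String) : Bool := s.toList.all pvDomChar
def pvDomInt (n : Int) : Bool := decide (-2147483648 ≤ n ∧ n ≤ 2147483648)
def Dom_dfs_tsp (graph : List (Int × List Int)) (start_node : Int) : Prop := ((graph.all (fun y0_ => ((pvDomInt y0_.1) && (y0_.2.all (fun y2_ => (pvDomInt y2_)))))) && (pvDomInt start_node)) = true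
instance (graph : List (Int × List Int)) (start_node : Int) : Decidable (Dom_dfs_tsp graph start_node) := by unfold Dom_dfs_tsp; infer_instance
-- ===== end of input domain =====

-- B rewrites A's recursive backtracking as an iterative DFS over an explicit stack of partial
-- paths (neighbours pushed in reversed order), returning the identical first Hamiltonian tour.

-- Shared helpers for both ports:
-- graph[k] (dict lookup). Python raises KeyError on a missing key; the port defaults to []
-- there. Both Pythons perform the identical lookups in the identical order, so this modelling
-- choice is the same for both ports; Pre_dfs_tsp keeps the tester on well-formed graphs.
def pvNbrs (g : List (Int × List Int)) (k : Int) : List Int :=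
  (PySem.Dict.mk g).getD k []

-- All node values that can ever appear on a path: the start node and every adjacency entry.
def pvU (g : List (Int × List Int)) (s : Int) : List Int := s :: g.flatMap Prod.snd

-- Fuel for port A's recursion: paths are duplicate-free lists over pvU, so recursion depth
-- never exceeds (pvU g s).length + 1; the fuel is a termination device only and is proved
-- never to be exhausted (pvDfsA_fuel below).
def pvB (g : List (Int × List Int)) (s : Int) : Nat := (pvU g s).length + 1

-- ===== PORT A =====
mutual
-- the inner closure `dfs(current_node, path)` of A
def pvDfsA (g : List (Int × List Int)) (s : Int) : Nat → Int → List Int → Option (List Int)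
  | 0, _, _ => none   -- never reached: fuel bounds the recursion depth (see pvDfsA_fuel)
  | fuel + 1, cur, path =>
    if path.length = g.length then some (path ++ [s])   -- complete the tour
    else pvDfsANbrs g s fuel path (pvNbrs g cur)
termination_by fuel cur path => (fuel, 0)
-- the `for neighbour in graph[current_node]` loop with its early return
def pvDfsANbrs (g : List (Int × List Int)) (s : Int) : Nat → List Int → List Int → Option (List Int)
  | _, _, [] => none
  | fuel, path, n :: ns =>
    if n ∈ path then pvDfsANbrs g s fuel path ns
    else
      -- `tour` is path'+[start_node], always a nonempty list, so `if tour:` = `is not None`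
      match pvDfsA g s fuel n (path ++ [n]) with
      | some t => some t
      | none => pvDfsANbrs g s fuel path ns
termination_by fuel path ns => (fuel, ns.length + 1)
end

def dfs_tsp (graph : List (Int × List Int)) (start_node : Int) : Option (List Int) :=
  pvDfsA graph start_node (pvB graph start_node) start_node [start_node]

-- ===== PORT B =====
-- Fuel for port B's while loop: the number of iterations is bounded by the size of the DFS
-- tree of duplicate-free paths, at most pvW ^ pvB (proved never exhausted in pvRunB_eq_pvG).
def pvW (g : List (Int × List Int)) (s : Int) : Nat :=
  pvB g s + g.foldr (fun kv m => max kv.2.length m) 0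

-- the `while stack:` loop of B; the stack's top is the list head (Python's list end).
-- Pushing the filtered neighbours in reversed order onto a top-at-end Python stack leaves
-- them on top in original order, i.e. prepends them in order to a top-at-head stack.
def pvRunB (g : List (Int × List Int)) (s : Int) : Nat → List (List Int) → Option (List Int)
  | _, [] => none
  | 0, _ :: _ => none   -- never reached: fuel exceeds the number of iterations
  | fuel + 1, path :: rest =>
    if path.length = g.length then some (path ++ [s])
    else
      pvRunB g s fuel
        ((((pvNbrs g (PySem.List.pyGetD path (-1) 0)).filter
            (fun n => decide (n ∉ path))).map (fun n => path ++ [n])) ++ rest)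

def dfs_tsp_alt (graph : List (Int × List Int)) (start_node : Int) : Option (List Int) :=
  pvRunB graph start_node (pvW graph start_node ^ pvB graph start_node) [[start_node]]

-- ===== PRECONDITION & SPEC =====
-- nodes reachable from the seed set within k edge steps, stepping only through key nodes
def pvReach (g : List (Int × List Int)) : Nat → List Int → List Int
  | 0, r => r
  | k + 1, r =>
    pvReach g k
      (r ++ (r.filter (fun v => decide (v ∈ g.map Prod.fst))).flatMap (pvNbrs g))

-- Pre_ admits the single-node graph and every graph whose start node is a key and from whose
-- start no non-key node is reachable within num_nodes−2 edge steps (through key nodes): then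
-- no lookup can miss. Outside it Python (A and B alike, at the same lookup) can raise
-- KeyError; on a few such graphs a tour still completes before the bad lookup and both return
-- the same ordinary value — see the cites in claim.json.
def Pre_dfs_tsp (graph : List (Int × List Int)) (start_node : Int) : Prop :=
  graph.length = 1 ∨
    (start_node ∈ graph.map Prod.fst ∧
      ∀ v ∈ pvReach graph (graph.length - 2) [start_node], v ∈ graph.map Prod.fst)
instance (graph : List (Int × List Int)) (start_node : Int) : Decidable (Pre_dfs_tsp graph start_node) := by
  unfold Pre_dfs_tsp; infer_instance

def pvWitness_dfs_tsp : (List (Int × List Int)) × Int := ([(0, [1]), (1, [0])], 0)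

def Spec_dfs_tsp (graph : List (Int × List Int)) (start_node : Int) (out : Option (List Int)) : Prop := out = dfs_tsp_alt graph start_node
instance (graph : List (Int × List Int)) (start_node : Int) (out : Option (List Int)) : Decidable (Spec_dfs_tsp graph start_node out) := by unfold Spec_dfs_tsp; infer_instance

-- ===== CLAIM (what is proved, stated in full; the proofs are below) =====
def Claim_equal_dfs_tsp : Prop := ∀ (graph : List (Int × List Int)) (start_node : Int), Dom_dfs_tsp graph start_node → Pre_dfs_tsp graph start_node → Spec_dfs_tsp graph start_node (dfs_tsp graph start_node)

-- ===== LEMMAS AND PROOFS =====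

-- invariant of every partial path: nonempty, duplicate-free, over pvU
def pvInv (g : List (Int × List Int)) (s : Int) (p : List Int) : Prop :=
  p ≠ [] ∧ p.Nodup ∧ ∀ x ∈ p, x ∈ pvU g s

-- the canonical meaning of a stack: first tour found by A's dfs on its entries, in order
def pvG (g : List (Int × List Int)) (s : Int) : List (List Int) → Option (List Int)
  | [] => none
  | p :: ps =>
    match pvDfsA g s (pvB g s) (PySem.List.pyGetD p (-1) 0) p with
    | some t => some t
    | none => pvG g s ps

-- strictly decreasing measure of a stack
def pvMeas (g : List (Int × List Int)) (s : Int) (st : List (List Int)) : Nat :=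
  (st.map (fun p => pvW g s ^ (pvB g s - p.length))).sum

theorem pvG_cons (g : List (Int × List Int)) (s : Int) (p : List Int) (ps : List (List Int)) :
    pvG g s (p :: ps) =
      match pvDfsA g s (pvB g s) (PySem.List.pyGetD p (-1) 0) p with
      | some t => some t
      | none => pvG g s ps := rfl

theorem pvNbrs_eq (g : List (Int × List Int)) (k : Int) :
    pvNbrs g k = ((g.find? (fun p => p.1 == k)).map Prod.snd).getD [] := rfl

theorem pvNbrs_subset (g : List (Int × List Int)) (k x : Int)
    (hx : x ∈ pvNbrs g k) : x ∈ g.flatMap Prod.snd := by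
  rw [pvNbrs_eq] at hx
  cases h : g.find? (fun p => p.1 == k) with
  | none => rw [h] at hx; simp at hx
  | some p =>
    rw [h] at hx
    exact List.mem_flatMap.mpr ⟨p, List.mem_of_find?_eq_some h, hx⟩

theorem pvAdjLen (g : List (Int × List Int)) (p : Int × List Int) (hp : p ∈ g) :
    p.2.length ≤ g.foldr (fun kv m => max kv.2.length m) 0 := by
  induction g with
  | nil => simp at hp
  | cons hd tl ih =>
    rcases List.mem_cons.mp hp with h | h
    · subst h; simp [List.foldr_cons]
    · exact le_trans (ih h) (by simp [List.foldr_cons])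

theorem pvNbrs_len (g : List (Int × List Int)) (k : Int) :
    (pvNbrs g k).length ≤ g.foldr (fun kv m => max kv.2.length m) 0 := by
  rw [pvNbrs_eq]
  cases h : g.find? (fun p => p.1 == k) with
  | none => simp
  | some p =>
    simpa using pvAdjLen g p (List.mem_of_find?_eq_some h)

theorem pvLen_le (p u : List Int) (hnd : p.Nodup) (hsub : ∀ x ∈ p, x ∈ u) :
    p.length ≤ u.length := by
  classical
  calc p.length = p.toFinset.card := (List.toFinset_card_of_nodup hnd).symm
    _ ≤ u.toFinset.card := Finset.card_le_card (by
        intro x hx; simp only [List.mem_toFinset] at *; exact hsub x hx)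
    _ ≤ u.length := u.toFinset_card_le

theorem pvDfsA_fuel (g : List (Int × List Int)) (s : Int) :
    ∀ (k : Nat) (path : List Int) (cur : Int) (f1 f2 : Nat),
      path.Nodup → (∀ x ∈ path, x ∈ pvU g s) →
      pvB g s ≤ path.length + k →
      pvB g s ≤ path.length + f1 → pvB g s ≤ path.length + f2 →
      pvDfsA g s f1 cur path = pvDfsA g s f2 cur path := by
  intro k
  induction k with
  | zero =>
    intro path cur f1 f2 hnd hsub hk _ _
    have hlen := pvLen_le path (pvU g s) hnd hsub
    have hB : pvB g s = (pvU g s).length + 1 := rfl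
    omega
  | succ k ih =>
    intro path cur f1 f2 hnd hsub hk h1 h2
    have hlen := pvLen_le path (pvU g s) hnd hsub
    have hB : pvB g s = (pvU g s).length + 1 := rfl
    obtain ⟨a, rfl⟩ : ∃ a, f1 = a + 1 := ⟨f1 - 1, by omega⟩
    obtain ⟨b, rfl⟩ : ∃ b, f2 = b + 1 := ⟨f2 - 1, by omega⟩
    simp only [pvDfsA]
    split
    · rfl
    · have inner : ∀ ns : List Int, (∀ n ∈ ns, n ∈ pvU g s) →
          pvDfsANbrs g s a path ns = pvDfsANbrs g s b path ns := by
        intro ns hns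
        induction ns with
        | nil => simp [pvDfsANbrs]
        | cons n ns ihn =>
          have hns' : ∀ m ∈ ns, m ∈ pvU g s :=
            fun m hm => hns m (List.mem_cons_of_mem _ hm)
          simp only [pvDfsANbrs]
          by_cases hn : n ∈ path
          · rw [if_pos hn, if_pos hn]; exact ihn hns'
          · rw [if_neg hn, if_neg hn]
            have hrec : pvDfsA g s a n (path ++ [n]) = pvDfsA g s b n (path ++ [n]) := by
              apply ih (path ++ [n]) n a b
              · rw [List.nodup_append]
                refine ⟨hnd, List.nodup_singleton _, ?_⟩
                intro a ha m hm
                simp only [List.mem_singleton] at hm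
                subst hm
                exact fun heq => hn (heq ▸ ha)
              · intro x hx
                rcases List.mem_append.mp hx with h | h
                · exact hsub x h
                · simp only [List.mem_singleton] at h
                  exact h ▸ hns n List.mem_cons_self
              · simp only [List.length_append, List.length_singleton]; omega
              · simp only [List.length_append, List.length_singleton]; omega
              · simp only [List.length_append, List.length_singleton]; omega
            rw [hrec]
            cases pvDfsA g s b n (path ++ [n]) with
            | some t => rfl
            | none => exact ihn hns'
      exact inner (pvNbrs g cur)
        (fun n hn => List.mem_cons_of_mem _ (pvNbrs_subset g cur n hn))

theorem pvBridge (g : List (Int × List Int)) (s : Int) (path : List Int) (f : Nat)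
    (hne : path ≠ []) (hnd : path.Nodup) (hsub : ∀ x ∈ path, x ∈ pvU g s)
    (hf : pvB g s ≤ path.length + 1 + f) :
    ∀ ns : List Int, (∀ n ∈ ns, n ∈ pvU g s) →
      pvDfsANbrs g s f path ns =
        pvG g s ((ns.filter (fun n => decide (n ∉ path))).map (fun n => path ++ [n])) := by
  intro ns
  induction ns with
  | nil => intro _; simp [pvDfsANbrs, pvG]
  | cons n ns ihn =>
    intro hns
    have hns' : ∀ m ∈ ns, m ∈ pvU g s :=
      fun m hm => hns m (List.mem_cons_of_mem _ hm)
    by_cases hn : n ∈ path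
    · have hd : decide (n ∉ path) = false := by simp [hn]
      simp only [pvDfsANbrs, if_pos hn, List.filter_cons, hd, if_neg Bool.false_ne_true]
      exact ihn hns'
    · have hd : decide (n ∉ path) = true := by simp [hn]
      have hfc : (n :: ns).filter (fun n => decide (n ∉ path))
          = n :: ns.filter (fun n => decide (n ∉ path)) := by
        simp only [List.filter_cons, hd, if_true]
      rw [hfc, List.map_cons, pvG_cons, PySem.List.pyGetD_neg_one_append_singleton]
      simp only [pvDfsANbrs, if_neg hn]
      have hrec : pvDfsA g s f n (path ++ [n]) = pvDfsA g s (pvB g s) n (path ++ [n]) := by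
        apply pvDfsA_fuel g s (pvB g s) (path ++ [n]) n f (pvB g s)
        · rw [List.nodup_append]
          refine ⟨hnd, List.nodup_singleton _, ?_⟩
          intro a ha m hm
          simp only [List.mem_singleton] at hm
          subst hm
          exact fun heq => hn (heq ▸ ha)
        · intro x hx
          rcases List.mem_append.mp hx with h | h
          · exact hsub x h
          · simp only [List.mem_singleton] at h
            exact h ▸ hns n List.mem_cons_self
        · simp only [List.length_append, List.length_singleton]; omega
        · simp only [List.length_append, List.length_singleton]; omega
        · simp only [List.length_append, List.length_singleton]; omega
      rw [hrec]
      cases pvDfsA g s (pvB g s) n (path ++ [n]) with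
      | some t => rfl
      | none => exact ihn hns'

theorem pvG_append (g : List (Int × List Int)) (s : Int) (xs ys : List (List Int)) :
    pvG g s (xs ++ ys) =
      match pvG g s xs with
      | some t => some t
      | none => pvG g s ys := by
  induction xs with
  | nil => simp [pvG]
  | cons p ps ih =>
    simp only [List.cons_append, pvG, ih]
    cases pvDfsA g s (pvB g s) (PySem.List.pyGetD p (-1) 0) p <;> rfl

theorem pvMeas_cons (g : List (Int × List Int)) (s : Int) (p : List Int)
    (ps : List (List Int)) :
    pvMeas g s (p :: ps) = pvW g s ^ (pvB g s - p.length) + pvMeas g s ps := by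
  simp [pvMeas]

theorem pvMeas_append (g : List (Int × List Int)) (s : Int) (xs ys : List (List Int)) :
    pvMeas g s (xs ++ ys) = pvMeas g s xs + pvMeas g s ys := by
  simp [pvMeas]

theorem pvSum_const (l : List Int) (c : Nat) :
    (l.map (fun _ => c)).sum = l.length * c := by
  simp [Nat.mul_comm]

theorem pvW_pos (g : List (Int × List Int)) (s : Int) : 0 < pvW g s := by
  have h : pvW g s = (pvU g s).length + 1 + g.foldr (fun kv m => max kv.2.length m) 0 := rfl
  omega

theorem pvRunB_eq_pvG (g : List (Int × List Int)) (s : Int) :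
    ∀ (f : Nat) (st : List (List Int)),
      (∀ p ∈ st, pvInv g s p) → pvMeas g s st ≤ f →
      pvRunB g s f st = pvG g s st := by
  intro f
  induction f with
  | zero =>
    intro st hinv hm
    cases st with
    | nil => rfl
    | cons p ps =>
      exfalso
      rw [pvMeas_cons] at hm
      have hXpos : 0 < pvW g s ^ (pvB g s - p.length) := Nat.pow_pos (pvW_pos g s)
      omega
  | succ f ih =>
    intro st hinv hm
    cases st with
    | nil => rfl
    | cons p rest =>
      obtain ⟨hne, hnd, hsub⟩ := hinv p List.mem_cons_self
      have hinvrest : ∀ q ∈ rest, pvInv g s q :=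
        fun q hq => hinv q (List.mem_cons_of_mem _ hq)
      have hlenp := pvLen_le p (pvU g s) hnd hsub
      have hB : pvB g s = (pvU g s).length + 1 := rfl
      by_cases hdone : p.length = g.length
      · rw [pvG_cons]
        simp only [pvRunB, if_pos hdone]
        rw [hB]
        simp only [pvDfsA, if_pos hdone]
      · simp only [pvRunB, if_neg hdone]
        have hchinv : ∀ q ∈ ((pvNbrs g (PySem.List.pyGetD p (-1) 0)).filter
            (fun n => decide (n ∉ p))).map (fun n => p ++ [n]), pvInv g s q := by
          intro q hq
          rw [List.mem_map] at hq
          obtain ⟨n, hnfl, rfl⟩ := hq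
          rw [List.mem_filter] at hnfl
          obtain ⟨hnn, hnp⟩ := hnfl
          have hnp' : n ∉ p := by simpa using hnp
          refine ⟨by simp, ?_, ?_⟩
          · rw [List.nodup_append]
            refine ⟨hnd, List.nodup_singleton _, ?_⟩
            intro a ha m hmm
            simp only [List.mem_singleton] at hmm
            subst hmm
            exact fun heq => hnp' (heq ▸ ha)
          · intro x hx
            rcases List.mem_append.mp hx with h | h
            · exact hsub x h
            · simp only [List.mem_singleton] at h
              exact h ▸ List.mem_cons_of_mem _
                (pvNbrs_subset g (PySem.List.pyGetD p (-1) 0) n hnn)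
        have hmeas' : pvMeas g s
            ((((pvNbrs g (PySem.List.pyGetD p (-1) 0)).filter
              (fun n => decide (n ∉ p))).map (fun n => p ++ [n])) ++ rest) ≤ f := by
          rw [pvMeas_append]
          have e2 : pvMeas g s (((pvNbrs g (PySem.List.pyGetD p (-1) 0)).filter
              (fun n => decide (n ∉ p))).map (fun n => p ++ [n]))
              = ((pvNbrs g (PySem.List.pyGetD p (-1) 0)).filter
                  (fun n => decide (n ∉ p))).length
                * pvW g s ^ (pvB g s - (p.length + 1)) := by
            rw [pvMeas, List.map_map]
            have hc : ((fun q : List Int => pvW g s ^ (pvB g s - q.length)) ∘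
                (fun n : Int => p ++ [n]))
                = fun _ : Int => pvW g s ^ (pvB g s - (p.length + 1)) := by
              funext n; simp
            rw [hc, pvSum_const]
          rw [e2]
          rw [pvMeas_cons] at hm
          have hfl_le : ((pvNbrs g (PySem.List.pyGetD p (-1) 0)).filter
              (fun n => decide (n ∉ p))).length
              ≤ g.foldr (fun kv m => max kv.2.length m) 0 :=
            le_trans (List.length_filter_le _ _)
              (pvNbrs_len g (PySem.List.pyGetD p (-1) 0))
          have hWdef : pvW g s = pvB g s + g.foldr (fun kv m => max kv.2.length m) 0 := rfl
          have hflW : ((pvNbrs g (PySem.List.pyGetD p (-1) 0)).filter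
              (fun n => decide (n ∉ p))).length + 1 ≤ pvW g s := by omega
          have he : pvB g s - p.length = (pvB g s - (p.length + 1)) + 1 := by omega
          have hXpos : 0 < pvW g s ^ (pvB g s - (p.length + 1)) :=
            Nat.pow_pos (pvW_pos g s)
          have hmul : (((pvNbrs g (PySem.List.pyGetD p (-1) 0)).filter
              (fun n => decide (n ∉ p))).length + 1)
                * pvW g s ^ (pvB g s - (p.length + 1))
              ≤ pvW g s * pvW g s ^ (pvB g s - (p.length + 1)) :=
            Nat.mul_le_mul_right _ hflW
          have hsucc : (((pvNbrs g (PySem.List.pyGetD p (-1) 0)).filter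
              (fun n => decide (n ∉ p))).length + 1)
                * pvW g s ^ (pvB g s - (p.length + 1))
              = ((pvNbrs g (PySem.List.pyGetD p (-1) 0)).filter
                  (fun n => decide (n ∉ p))).length
                  * pvW g s ^ (pvB g s - (p.length + 1))
                + pvW g s ^ (pvB g s - (p.length + 1)) := Nat.succ_mul _ _
          have hpow : pvW g s * pvW g s ^ (pvB g s - (p.length + 1))
              = pvW g s ^ (pvB g s - p.length) := by
            rw [he, pow_succ, Nat.mul_comm]
          omega
        rw [ih _ (by
          intro q hq
          rcases List.mem_append.mp hq with h | h
          · exact hchinv q h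
          · exact hinvrest q h) hmeas']
        rw [pvG_append, pvG_cons, hB]
        simp only [pvDfsA, if_neg hdone]
        rw [pvBridge g s p ((pvU g s).length) hne hnd hsub (by omega)
          (pvNbrs g (PySem.List.pyGetD p (-1) 0))
          (fun n hn => List.mem_cons_of_mem _
            (pvNbrs_subset g (PySem.List.pyGetD p (-1) 0) n hn))]

-- ===== VERDICT (by name: the statement is the Claim_ definition above) =====
theorem dfs_tsp_spec : Claim_equal_dfs_tsp := by
  intro g s _ _
  unfold Spec_dfs_tsp dfs_tsp dfs_tsp_alt
  have hinv : ∀ p ∈ [[s]], pvInv g s p := by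
    intro p hp
    simp only [List.mem_singleton] at hp
    subst hp
    refine ⟨by simp, List.nodup_singleton _, ?_⟩
    intro x hx
    simp only [List.mem_singleton] at hx
    subst hx
    exact List.mem_cons_self
  have hmeas : pvMeas g s [[s]] ≤ pvW g s ^ pvB g s := by
    rw [pvMeas_cons]
    have h0 : pvMeas g s [] = 0 := rfl
    have hle : pvW g s ^ (pvB g s - ([s] : List Int).length) ≤ pvW g s ^ pvB g s :=
      Nat.pow_le_pow_right (pvW_pos g s) (by omega)
    omega
  rw [pvRunB_eq_pvG g s _ [[s]] hinv hmeas, pvG_cons]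
  have hkey : PySem.List.pyGetD [s] (-1) (0 : Int) = s := by
    simp [PySem.List.pyGetD_neg_one]
  rw [hkey]
  cases pvDfsA g s (pvB g s) s [s] with
  | some t => rfl
  | none => rfl
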